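-- pv_equiv track=rewrite | github.com/bubpen/codekata | 프로그래머스/0/120896. 한 번만 등장한 문자/한 번만 등장한 문자.py | solution
-- ===== SOURCE A (Python) =====
-- def solution(s):
--     l = list(s)
--     l.sort()
--     answer = ''
--     cnt = {}
--     for i in l:
--         cnt[i] = cnt.get(i,0)+1
--     for i in cnt.keys():
--         if cnt[i] ==1:
--             answer = answer+i
--     return answer
-- ===== SOURCE B (Python) =====
-- def solution(s):
--     def rec(chars):
--         if not chars:
--             return ''
--         c = chars[0]
--         k = 1
--         while k < len(chars) and chars[k] == c:
--             k += 1
--         rest = rec(chars[k:])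
--         return c + rest if k == 1 else rest
--     return rec(sorted(s))
-- ===== Notes on version B (the rewrite author's own statement) =====
-- stated objective: alternative
-- what changed: Replaces A's frequency-dict pipeline (build a full count table over the sorted chars, then scan its keys) with a recursive run-length scan of the sorted characters that keeps the head of each run of length 1 and never counts anything.
import Mathlib
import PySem

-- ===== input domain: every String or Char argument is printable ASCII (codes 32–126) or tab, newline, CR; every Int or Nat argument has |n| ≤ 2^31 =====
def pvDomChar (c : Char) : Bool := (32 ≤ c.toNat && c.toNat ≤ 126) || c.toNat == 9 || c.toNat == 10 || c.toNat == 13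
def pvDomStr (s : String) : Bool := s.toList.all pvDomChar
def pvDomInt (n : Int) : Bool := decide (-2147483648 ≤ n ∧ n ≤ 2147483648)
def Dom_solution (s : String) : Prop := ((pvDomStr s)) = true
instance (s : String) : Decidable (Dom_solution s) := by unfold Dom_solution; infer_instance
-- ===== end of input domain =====

-- B replaces A's frequency-dict pipeline by a recursive run-length scan of the sorted characters, keeping the head of each length-1 run (objective: alternative).

-- ===== PORT A =====
-- l = list(s); l.sort(); cnt built by the first loop; answer by the key loop (cnt[i] exists for every key, ported as getD)
def solution (s : String) : String :=
  let l := PySem.List.sorted s.toList (fun c => c)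
  let cnt := l.foldl (fun d i => d.insert i (d.getD i 0 + 1)) (PySem.Dict.empty : PySem.Dict Char Int)
  let answer := cnt.keys.foldl
    (fun ans i => if cnt.getD i 0 == 1 then ans ++ [i] else ans) ([] : List Char)
  String.ofList answer

-- ===== PORT B =====
-- rec(chars): the while loop counts the run of chars[0] (k = 1 + run.length), the recursive call
-- gets chars[k:], and chars[0] is kept iff k == 1 (run empty)
def pvRecB (chars : List Char) : List Char :=
  match chars with
  | [] => []
  | c :: rest =>
    let run := rest.takeWhile (fun x => x == c)
    let tail := pvRecB (rest.drop run.length)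
    if run.length = 0 then c :: tail else tail
termination_by chars.length
decreasing_by
  simp only [List.length_drop, List.length_cons]
  omega

-- return rec(sorted(s))
def solution_alt (s : String) : String :=
  String.ofList (pvRecB (PySem.List.sorted s.toList (fun c => c)))

-- ===== PRECONDITION & SPEC =====
def Spec_solution (s : String) (out : String) : Prop := out = solution_alt s
instance (s : String) (out : String) : Decidable (Spec_solution s out) := by unfold Spec_solution; infer_instance

-- ===== CLAIM (what is proved, stated in full; the proofs are below) =====
def Claim_equal_solution : Prop := ∀ (s : String), Dom_solution s → Spec_solution s (solution s)

-- ===== LEMMAS AND PROOFS =====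

theorem pvFoldlAddAbsorb {α : Type} [BEq α] (xs acc : List α)
    (h : ∀ x ∈ xs, acc.contains x = true) :
    List.foldl PySem.Set.add acc xs = acc := by
  induction xs with
  | nil => rfl
  | cons x xs ih =>
    have hx := h x (by simp)
    have : PySem.Set.add acc x = acc := by simp [PySem.Set.add, PySem.Set.contains, hx]
    simp only [List.foldl_cons, this]
    exact ih (fun y hy => h y (by simp [hy]))

theorem pvFoldlAddHead (a : Char) (xs : List Char) (acc : List Char) (ha : a ∉ xs) :
    List.foldl PySem.Set.add (a :: acc) xs = a :: List.foldl PySem.Set.add acc xs := by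
  induction xs generalizing acc with
  | nil => rfl
  | cons x xs ih =>
    have hxa : (x == a) = false := by
      simp only [beq_eq_false_iff_ne, ne_eq]
      intro h; exact ha (h ▸ List.mem_cons_self)
    have hstep : PySem.Set.add (a :: acc) x = a :: PySem.Set.add acc x := by
      simp only [PySem.Set.add, PySem.Set.contains, List.contains_cons, hxa, Bool.false_or]
      split <;> simp
    simp only [List.foldl_cons, hstep]
    exact ih _ (fun h => ha (List.mem_cons_of_mem x h))

theorem pvRecB_eq_aux (n : Nat) (t : List Char) (hn : t.length ≤ n) (hpw : t.Pairwise (· ≤ ·)) :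
    pvRecB t = (PySem.Set.ofList t).filter (fun c => ((List.count c t : Int) == 1)) := by
  induction n generalizing t with
  | zero =>
    have : t = [] := List.eq_nil_of_length_eq_zero (by omega)
    subst this
    simp [pvRecB]
  | succ n ih =>
    cases t with
    | nil => simp [pvRecB]
    | cons c rest =>
      rw [pvRecB.eq_def]
      simp only []
      have hdw : rest.drop (rest.takeWhile (fun x => x == c)).length
          = rest.dropWhile (fun x => x == c) := by
        nth_rewrite 2 [← List.takeWhile_append_dropWhile (p := fun x => x == c) (l := rest)]
        rw [List.drop_left]
      set run := rest.takeWhile (fun x => x == c) with hrun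
      set rest' := rest.dropWhile (fun x => x == c) with hrestd
      rw [hdw]
      have hrest : rest = run ++ rest' := (List.takeWhile_append_dropWhile).symm
      have hrunc : ∀ x ∈ run, x = c := by
        intro x hx
        have := List.mem_takeWhile_imp hx
        simpa using this
      have hpwrest : rest.Pairwise (· ≤ ·) := (List.pairwise_cons.mp hpw).2
      have hcle : ∀ x ∈ rest, c ≤ x := (List.pairwise_cons.mp hpw).1
      have hpwrest' : rest'.Pairwise (· ≤ ·) := hpwrest.sublist (List.dropWhile_sublist _)
      have hcnot : c ∉ rest' := by
        intro hc
        cases hrw : rest' with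
        | nil => rw [hrw] at hc; simp at hc
        | cons h tw =>
          have hhead : ((h == c) = false) := by
            have := List.head?_dropWhile_not (p := fun x => x == c) (l := rest)
            rw [← hrestd, hrw] at this; simpa using this
          rw [hrw] at hc
          rcases List.mem_cons.mp hc with hceq | hctw
          · rw [hceq] at hhead; simp at hhead
          · have hpw2 : (h :: tw).Pairwise (· ≤ ·) := by rw [← hrw]; exact hpwrest'
            have h1 : h ≤ c := (List.pairwise_cons.mp hpw2).1 c hctw
            have h2 : c ≤ h := hcle h (by
              rw [hrest, hrw]; exact List.mem_append_right _ (by simp))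
            have : h = c := le_antisymm h1 h2
            rw [this] at hhead; simp at hhead
      have hcountc : List.count c (c :: rest) = 1 + run.length := by
        rw [List.count_cons_self, hrest, List.count_append,
          List.count_eq_zero.mpr hcnot, List.count_eq_length.mpr (fun x hx => ((hrunc x hx) ▸ rfl))]
        omega
      have hcountx : ∀ x ∈ rest', List.count x (c :: rest) = List.count x rest' := by
        intro x hx
        have hxc : x ≠ c := fun h => hcnot (h ▸ hx)
        rw [List.count_cons_of_ne hxc.symm, hrest, List.count_append,
          List.count_eq_zero.mpr (fun hm => hxc (hrunc x hm))]
        omega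
      have hset : PySem.Set.ofList (c :: rest) = c :: PySem.Set.ofList rest' := by
        show List.foldl PySem.Set.add ([] : List Char) (c :: rest) = _
        rw [List.foldl_cons]
        have h1 : PySem.Set.add ([] : List Char) c = [c] := rfl
        rw [h1, hrest, List.foldl_append]
        rw [pvFoldlAddAbsorb run [c] (fun x hx => by simp [hrunc x hx])]
        exact pvFoldlAddHead c rest' [] hcnot
      rw [hset, List.filter_cons]
      have hlen : rest'.length ≤ n := by
        have h1 : rest'.length ≤ rest.length := List.length_dropWhile_le _ _
        have h2 : (c :: rest).length ≤ n + 1 := hn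
        simp at h2; omega
      have hfiltcong : (PySem.Set.ofList rest').filter (fun x => ((List.count x (c :: rest) : Int) == 1))
          = (PySem.Set.ofList rest').filter (fun x => ((List.count x rest' : Int) == 1)) := by
        apply List.filter_congr
        intro x hx
        rw [hcountx x ((PySem.List.mem_dedup _ _).mp hx)]
      rw [hfiltcong, ← ih rest' hlen hpwrest']
      have hcrest : List.count c rest = run.length := by
        rw [hrest, List.count_append, List.count_eq_zero.mpr hcnot,
          List.count_eq_length.mpr (fun x hx => ((hrunc x hx) ▸ rfl))]
        omega
      by_cases h0 : run.length = 0
      · simp [h0, hcrest]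
      · simp [h0, hcrest]

-- ===== VERDICT (by name: the statement is the Claim_ definition above) =====
theorem solution_spec : Claim_equal_solution := by
  intro s _
  unfold Spec_solution solution solution_alt
  simp only [PySem.Dict.foldl_insert_getD_add_one_eq_counter, PySem.Dict.keys_counter,
    PySem.Dict.getD_counter]
  rw [PySem.List.foldl_append_if
    (fun i => ((List.count i (PySem.List.sorted s.toList (fun c => c)) : Int) == 1))
    (fun i => i)]
  simp only [List.nil_append, List.map_id']
  rw [pvRecB_eq_aux (PySem.List.sorted s.toList (fun c => c)).length
    (PySem.List.sorted s.toList (fun c => c)) le_rfl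
    (PySem.List.sorted_pairwise s.toList (fun c => c))]
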